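-- pv_equiv track=rewrite | github.com/tamara-git/Algo1 | Guía7/vocales_distintas.py | sinRepeticion
-- ===== SOURCE A (Python) =====
-- vocales = ['a','e','i','o','u']
--
-- def vocales_en_palabra(lista:list[str]) -> list[str]:
--     vocales_en_palabra : list = []
--     for indice in range(len(lista)):
--         if lista[indice] in vocales:
--             vocales_en_palabra = vocales_en_palabra + [lista[indice]]
--     return vocales_en_palabra
--
-- def sinRepeticion(lista: list[str]) -> bool:
--     lista: list = vocales_en_palabra(lista)
--     vocales_diferentes = 0
--     if len((lista)) < 3:
--         return False
--     else:
--         for indice in range(len(lista)-1):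
--             for indice2 in range(indice + 1,len(lista)):
--                 if not(lista[indice] == lista [indice2]):
--                     vocales_diferentes += 1
--     if vocales_diferentes >= 3:
--         return True
--     else:
--         return False
-- ===== SOURCE B (Python) =====
-- def sinRepeticion(lista: list) -> bool:
--     # One pass: when a vowel x arrives, it forms an unequal pair with every
--     # previously seen vowel that is not x; keep running counts in a dict.
--     seen = 0
--     neq = 0
--     counts = {}
--     for x in lista:
--         if x in ('a', 'e', 'i', 'o', 'u'):
--             c = counts.get(x, 0)
--             neq += seen - c
--             counts[x] = c + 1
--             seen += 1
--     return neq >= 3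
-- ===== Notes on version B (the rewrite author's own statement) =====
-- stated objective: faster
-- what changed: A extracts the vowels and then compares every pair of them in a quadratic double loop; B makes a single pass keeping a dict of vowel frequencies and a running count of unequal pairs (each new vowel adds seen-minus-its-own-count), and drops A's redundant early length guard.
import Mathlib
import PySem

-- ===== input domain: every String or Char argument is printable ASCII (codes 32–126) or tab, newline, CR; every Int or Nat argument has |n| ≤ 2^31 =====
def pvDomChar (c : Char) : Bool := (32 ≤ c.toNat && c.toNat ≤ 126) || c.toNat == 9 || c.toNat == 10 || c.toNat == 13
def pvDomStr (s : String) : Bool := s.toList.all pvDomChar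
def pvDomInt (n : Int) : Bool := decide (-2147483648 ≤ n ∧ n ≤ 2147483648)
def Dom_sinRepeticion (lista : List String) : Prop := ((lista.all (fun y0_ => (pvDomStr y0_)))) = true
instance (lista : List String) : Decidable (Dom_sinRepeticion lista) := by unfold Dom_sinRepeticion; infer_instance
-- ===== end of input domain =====

-- B replaces A's quadratic all-pairs comparison over the extracted vowels by a single
-- pass that keeps a frequency dict and a running count of unequal pairs (objective: faster).

-- ===== PORT A =====
def vocalesA : List String := ["a", "e", "i", "o", "u"]

def vocalesEnPalabra (lista : List String) : List String :=
  (PySem.List.pyRange 0 (lista.length : Int) 1).foldl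
    (fun acc indice =>
      let x := PySem.List.pyGetD lista indice ""
      if vocalesA.contains x then acc ++ [x] else acc) []

def sinRepeticion (lista : List String) : Bool :=
  let l := vocalesEnPalabra lista
  if l.length < 3 then false
  else
    let vocales_diferentes :=
      (PySem.List.pyRange 0 ((l.length : Int) - 1) 1).foldl
        (fun acc indice =>
          (PySem.List.pyRange (indice + 1) (l.length : Int) 1).foldl
            (fun acc2 indice2 =>
              if !(PySem.List.pyGetD l indice "" == PySem.List.pyGetD l indice2 "")
              then acc2 + 1 else acc2) acc) (0 : Int)
    decide (vocales_diferentes ≥ 3)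

-- ===== PORT B =====
def sinRepeticion_alt (lista : List String) : Bool :=
  -- state: (seen, neq, counts)
  let st := lista.foldl
    (fun (s : Int × Int × PySem.Dict String Int) x =>
      if (["a", "e", "i", "o", "u"] : List String).contains x then
        let c := s.2.2.getD x 0
        (s.1 + 1, s.2.1 + (s.1 - c), s.2.2.insert x (c + 1))
      else s)
    (0, 0, PySem.Dict.empty)
  decide (st.2.1 ≥ 3)

-- ===== PRECONDITION & SPEC =====
def Spec_sinRepeticion (lista : List String) (out : Bool) : Prop := out = sinRepeticion_alt lista
instance (lista : List String) (out : Bool) : Decidable (Spec_sinRepeticion lista out) := by unfold Spec_sinRepeticion; infer_instance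

-- ===== CLAIM (what is proved, stated in full; the proofs are below) =====
def Claim_equal_sinRepeticion : Prop := ∀ (lista : List String), Dom_sinRepeticion lista → Spec_sinRepeticion lista (sinRepeticion lista)

-- ===== LEMMAS AND PROOFS =====

-- number of index pairs i < j whose elements differ
def pairsNeq : List String → Int
  | [] => 0
  | x :: xs => ((xs.countP (fun y => !(x == y))) : Int) + pairsNeq xs

theorem vocalesEnPalabra_eq_filter (lista : List String) :
    vocalesEnPalabra lista = lista.filter (fun x => vocalesA.contains x) := by
  unfold vocalesEnPalabra
  rw [PySem.List.foldl_pyRange_zero_pyGetD' lista ""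
      (fun acc x => if vocalesA.contains x then acc ++ [x] else acc) []]
  rw [PySem.List.foldl_append_if_eq_filter]
  rfl

theorem pairsNeq_append_singleton (v : List String) (x : String) :
    pairsNeq (v ++ [x]) = pairsNeq v + ((v.length : Int) - (v.count x : Int)) := by
  induction v with
  | nil => simp [pairsNeq]
  | cons z v ih =>
    by_cases h : z = x
    · subst h
      simp [pairsNeq, ih, List.countP_append, List.countP_nil, List.length_cons]
      ring
    · have h1 : (z == x) = false := by simp [h]
      have h2 : (x == z) = false := by simp [Ne.symm h]
      simp [pairsNeq, ih, List.countP_append, List.count_cons,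
        List.countP_nil, List.length_cons, h1]
      ring

theorem counter_append_insert (v : List String) (x : String) :
    PySem.Dict.counter (v ++ [x])
      = (PySem.Dict.counter v).insert x ((PySem.Dict.counter v).getD x 0 + 1) := by
  rw [← PySem.Dict.foldl_insert_getD_add_one_eq_counter (v ++ [x]),
      ← PySem.Dict.foldl_insert_getD_add_one_eq_counter v]
  simp [List.foldl_append]

theorem B_invariant (w v : List String) :
    w.foldl
      (fun (s : Int × Int × PySem.Dict String Int) x =>
        let c := s.2.2.getD x 0
        (s.1 + 1, s.2.1 + (s.1 - c), s.2.2.insert x (c + 1)))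
      (((v.length : Int)), pairsNeq v, PySem.Dict.counter v)
    = ((((v ++ w).length : Int)), pairsNeq (v ++ w), PySem.Dict.counter (v ++ w)) := by
  induction w generalizing v with
  | nil => simp
  | cons x w ih =>
    rw [List.foldl_cons]
    have key : List.foldl
        (fun (s : Int × Int × PySem.Dict String Int) x =>
          let c := s.2.2.getD x 0
          (s.1 + 1, s.2.1 + (s.1 - c), s.2.2.insert x (c + 1)))
        (((v.length : Int)) + 1,
         pairsNeq v + (((v.length : Int)) - (PySem.Dict.counter v).getD x 0),
         (PySem.Dict.counter v).insert x ((PySem.Dict.counter v).getD x 0 + 1)) w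
      = ((((v ++ x :: w).length : Int)), pairsNeq (v ++ x :: w), PySem.Dict.counter (v ++ x :: w)) := by
      rw [← counter_append_insert, PySem.Dict.getD_counter, ← pairsNeq_append_singleton]
      have hlen : ((v.length : Int)) + 1 = (((v ++ [x]).length : Int)) := by simp
      rw [hlen, ih (v ++ [x])]
      simp
    exact key

theorem inner_loop_eq (l : List String) (i : Int) (hi : 0 ≤ i) (v : String) (acc : Int) :
    (PySem.List.pyRange (i + 1) (l.length : Int) 1).foldl
      (fun acc2 j => if !(v == PySem.List.pyGetD l j "") then acc2 + 1 else acc2) acc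
    = acc + (((l.drop (i + 1).toNat).countP (fun y => !(v == y))) : Int) := by
  rw [PySem.List.foldl_pyRange_pyGetD' l ""
      (fun acc2 y => if !(v == y) then acc2 + 1 else acc2) acc (by omega)]
  rw [PySem.List.foldl_if_add_one]

theorem outer_loop_eq (l : List String) (c : Int) :
    (List.range (l.length - 1)).foldl
      (fun acc k => acc + (((l.drop (k + 1)).countP (fun y => !(l.getD k "" == y))) : Int)) c
    = c + pairsNeq l := by
  induction l generalizing c with
  | nil => simp [pairsNeq]
  | cons x xs ih =>
    cases xs with
    | nil => simp [pairsNeq]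
    | cons y ys =>
      have hlen : (x :: y :: ys).length - 1 = ((y :: ys).length - 1) + 1 := by simp
      rw [hlen, List.range_succ_eq_map, List.foldl_cons, List.foldl_map]
      refine Eq.trans (PySem.List.foldl_congr_mem _ _
          (fun (acc : Int) (k : Nat) =>
            acc + ((((y :: ys).drop (k + 1)).countP (fun z => !((y :: ys).getD k "" == z))) : Int))
          _ ?_) ?_
      · intro acc k _
        simp [Nat.succ_eq_add_one]
      · rw [ih]
        simp only [pairsNeq, List.getD_cons_zero, List.drop]
        ring

theorem A_count_eq (l : List String) (h3 : 3 ≤ l.length) :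
    (PySem.List.pyRange 0 ((l.length : Int) - 1) 1).foldl
      (fun acc indice =>
        (PySem.List.pyRange (indice + 1) (l.length : Int) 1).foldl
          (fun acc2 indice2 =>
            if !(PySem.List.pyGetD l indice "" == PySem.List.pyGetD l indice2 "")
            then acc2 + 1 else acc2) acc) (0 : Int)
    = pairsNeq l := by
  rw [PySem.List.pyRange_one, List.foldl_map]
  have hT : ((l.length : Int) - 1 - 0).toNat = l.length - 1 := by omega
  rw [hT]
  have hcong :
      (List.range (l.length - 1)).foldl
        (fun (acc : Int) (k : Nat) =>
          (PySem.List.pyRange ((0 : Int) + (k : Int) + 1) (l.length : Int) 1).foldl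
            (fun acc2 j =>
              if !(PySem.List.pyGetD l ((0 : Int) + (k : Int)) "" == PySem.List.pyGetD l j "")
              then acc2 + 1 else acc2) acc) (0 : Int)
      = (List.range (l.length - 1)).foldl
        (fun (acc : Int) (k : Nat) =>
          acc + (((l.drop (k + 1)).countP (fun y => !(l.getD k "" == y))) : Int))
        (0 : Int) := by
    apply PySem.List.foldl_congr_mem
    intro acc k _
    have h0 : ((0 : Int) + (k : Int)) = ((k : Int)) := by ring
    rw [h0]
    have := inner_loop_eq l (k : Int) (by positivity) (PySem.List.pyGetD l (k : Int) "") acc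
    rw [this]
    have hk : ((k : Int) + 1).toNat = k + 1 := by omega
    rw [hk, PySem.List.pyGetD_natCast]
  rw [hcong, outer_loop_eq]
  ring

theorem pairsNeq_small (v : List String) (h : v.length < 3) : pairsNeq v ≤ 1 := by
  match v, h with
  | [], _ => simp [pairsNeq]
  | [a], _ => simp [pairsNeq]
  | [a, b], _ =>
    simp only [pairsNeq, List.countP_cons, List.countP_nil]
    by_cases hab : a == b <;> simp [hab]

theorem alt_eq (lista : List String) :
    sinRepeticion_alt lista
      = decide (3 ≤ pairsNeq (lista.filter (fun x => vocalesA.contains x))) := by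
  unfold sinRepeticion_alt
  rw [PySem.List.foldl_if_eq_foldl_filter
      (fun x => (["a", "e", "i", "o", "u"] : List String).contains x)
      (fun (s : Int × Int × PySem.Dict String Int) x =>
        let c := s.2.2.getD x 0
        (s.1 + 1, s.2.1 + (s.1 - c), s.2.2.insert x (c + 1)))]
  have h0 : ((0 : Int), (0 : Int), (PySem.Dict.empty : PySem.Dict String Int))
      = (((([] : List String).length : Int)), pairsNeq [], PySem.Dict.counter []) := by
    simp [pairsNeq]; rfl
  rw [h0, B_invariant (lista.filter _) []]
  simp [vocalesA]

-- ===== VERDICT (by name: the statement is the Claim_ definition above) =====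
theorem sinRepeticion_spec : Claim_equal_sinRepeticion := by
  intro lista _
  unfold Spec_sinRepeticion
  rw [alt_eq]
  unfold sinRepeticion
  rw [vocalesEnPalabra_eq_filter]
  set v := lista.filter (fun x => vocalesA.contains x) with hv
  by_cases h : v.length < 3
  · simp only [h, if_true]
    have := pairsNeq_small v h
    symm
    simp only [decide_eq_false_iff_not]
    omega
  · simp only [h, if_false]
    rw [A_count_eq v (by omega)]
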